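-- pv_equiv track=rewrite | github.com/SR2k/leetcode | last-round/1482.制作-m-束花所需的最少天数.py | check
-- ===== SOURCE A (Python) =====
-- def check(bloomDay: list[int], day: int, m: int, k: int) -> bool:
--     result, cnt = 0, 0
--     for d in bloomDay:
--         if d <= day:
--             cnt += 1
--         else:
--             cnt = 0
--
--         if cnt == k:
--             cnt = 0
--             result += 1
--         if result >= m:
--             break
--     return result >= m
-- ===== SOURCE B (Python) =====
-- def check(bloomDay: list[int], day: int, m: int, k: int) -> bool:
--     # Staged approach: collect the indices of un-bloomed flowers ("blockers"),
--     # pad with virtual blockers at -1 and len(bloomDay); every pair of adjacent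
--     # blockers encloses a gap of bloomed flowers yielding (gap length) // k bouquets.
--     n = len(bloomDay)
--     blockers = [i for i, d in enumerate(bloomDay) if d > day]
--     bounds = [-1] + blockers + [n]
--     total = sum((b - a - 1) // k for a, b in zip(bounds, bounds[1:]))
--     return total >= m
-- ===== Notes on version B (the rewrite author's own statement) =====
-- stated objective: alternative
-- what changed: B drops A's per-element counter/early-break loop entirely: it first builds the list of indices of un-bloomed flowers, pads it with sentinels -1 and n, and sums (gap length) // k over adjacent index pairs.
-- outside the precondition, e.g. on check([3, 1], 2, 1, 0): A returns True, B raises ZeroDivisionError; on check([1, 1], 1, 0, -1): A returns True, B returns False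
import Mathlib
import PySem

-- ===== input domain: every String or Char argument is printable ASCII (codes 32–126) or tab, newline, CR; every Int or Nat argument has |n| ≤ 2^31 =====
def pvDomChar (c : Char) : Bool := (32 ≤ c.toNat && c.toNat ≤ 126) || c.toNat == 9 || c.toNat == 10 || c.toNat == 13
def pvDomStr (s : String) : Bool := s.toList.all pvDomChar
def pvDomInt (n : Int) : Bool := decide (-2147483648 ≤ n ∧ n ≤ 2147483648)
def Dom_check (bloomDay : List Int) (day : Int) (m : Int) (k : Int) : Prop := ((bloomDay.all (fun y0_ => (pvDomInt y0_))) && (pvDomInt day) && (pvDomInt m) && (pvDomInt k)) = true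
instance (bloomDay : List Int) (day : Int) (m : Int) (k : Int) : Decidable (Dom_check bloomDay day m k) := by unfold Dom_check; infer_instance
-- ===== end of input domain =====

-- B replaces A's per-element reset counter with early break by a staged computation: the list of
-- un-bloomed indices plus sentinels -1/n, summing (gap)//k over adjacent pairs; same value for k ≥ 1.

-- ===== PORT A =====
-- the for-loop with its break, state (result, cnt)
def checkLoop (day m k : Int) : List Int → Int → Int → Int
  | [], result, _ => result
  | d :: rest, result, cnt =>
    let cnt := if d ≤ day then cnt + 1 else 0
    let rc : Int × Int := if cnt = k then (result + 1, 0) else (result, cnt)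
    if rc.1 ≥ m then rc.1
    else checkLoop day m k rest rc.1 rc.2

def check (bloomDay : List Int) (day : Int) (m : Int) (k : Int) : Bool :=
  decide (checkLoop day m k bloomDay 0 0 ≥ m)

-- ===== PORT B =====
def check_alt (bloomDay : List Int) (day : Int) (m : Int) (k : Int) : Bool :=
  let n : Int := bloomDay.length
  let blockers : List Int :=
    ((PySem.List.enumerate bloomDay 0).filter (fun p => day < p.2)).map (fun p => p.1)
  let bounds : List Int := -1 :: (blockers ++ [n])
  let total : Int :=
    ((bounds.zip bounds.tail).map
      (fun p => PySem.Int.floordiv (p.2 - p.1 - 1) k)).foldl (· + ·) 0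
  decide (total ≥ m)

-- ===== PRECONDITION & SPEC =====
-- Pre_ excludes k ≤ 0: B's (gap) // k raises ZeroDivisionError for k = 0, and for k < 0 the
-- values A returns (its counter can never equal a negative k) are accidents of its reset counter.
def Pre_check (bloomDay : List Int) (day : Int) (m : Int) (k : Int) : Prop := 1 ≤ k
instance (bloomDay : List Int) (day : Int) (m : Int) (k : Int) : Decidable (Pre_check bloomDay day m k) := by unfold Pre_check; infer_instance
def pvWitness_check : List Int × Int × Int × Int := ([1, 3, 2, 2], 2, 1, 2)

def Spec_check (bloomDay : List Int) (day : Int) (m : Int) (k : Int) (out : Bool) : Prop := out = check_alt bloomDay day m k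
instance (bloomDay : List Int) (day : Int) (m : Int) (k : Int) (out : Bool) : Decidable (Spec_check bloomDay day m k out) := by unfold Spec_check; infer_instance

-- ===== CLAIM (what is proved, stated in full; the proofs are below) =====
def Claim_equal_check : Prop := ∀ (bloomDay : List Int) (day : Int) (m : Int) (k : Int), Dom_check bloomDay day m k → Pre_check bloomDay day m k → Spec_check bloomDay day m k (check bloomDay day m k)

-- ===== LEMMAS AND PROOFS =====

-- A's bouquet count without the early break, from partial-run counter cnt
def fullCount (day k : Int) : List Int → Int → Int
  | [], _ => 0
  | d :: rest, cnt =>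
    let cnt := if d ≤ day then cnt + 1 else 0
    if cnt = k then 1 + fullCount day k rest 0 else fullCount day k rest cnt

theorem fullCount_nonneg (day k : Int) (l : List Int) (cnt : Int) :
    0 ≤ fullCount day k l cnt := by
  induction l generalizing cnt with
  | nil => simp [fullCount]
  | cons d rest ih =>
    by_cases hd : d ≤ day <;>
      simp only [fullCount, hd, ite_true, ite_false] <;>
      split <;> first | (have := ih 0; omega) | apply ih

-- the early break does not change whether the result reaches m
theorem checkLoop_ge_iff (day m k : Int) (l : List Int) (result cnt : Int) :
    checkLoop day m k l result cnt ≥ m ↔ result + fullCount day k l cnt ≥ m := by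
  induction l generalizing result cnt with
  | nil => simp [checkLoop, fullCount]
  | cons d rest ih =>
    by_cases hd : d ≤ day <;>
      simp only [checkLoop, fullCount, hd, ite_true, ite_false]
    · by_cases hk1 : cnt + 1 = k
      · simp only [if_pos hk1]
        by_cases hm : result + 1 ≥ m
        · simp only [if_pos hm]
          have := fullCount_nonneg day k rest 0
          omega
        · simp only [if_neg hm]
          rw [ih]
          omega
      · simp only [if_neg hk1]
        by_cases hm : result ≥ m
        · simp only [if_pos hm]
          have := fullCount_nonneg day k rest (cnt + 1)
          omega
        · simp only [if_neg hm]
          rw [ih]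
    · by_cases hk1 : (0 : Int) = k
      · simp only [if_pos hk1]
        by_cases hm : result + 1 ≥ m
        · simp only [if_pos hm]
          have := fullCount_nonneg day k rest 0
          omega
        · simp only [if_neg hm]
          rw [ih]
          omega
      · simp only [if_neg hk1]
        by_cases hm : result ≥ m
        · simp only [if_pos hm]
          have := fullCount_nonneg day k rest 0
          omega
        · simp only [if_neg hm]
          rw [ih]

theorem div_step_full (run k : Int) (hk : 0 < k) (hfin : run % k + 1 = k) :
    (run + 1) / k = run / k + 1 ∧ (run + 1) % k = 0 := by
  have h3 := Int.mul_ediv_add_emod run k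
  refine Int.ediv_emod_unique hk |>.mpr ⟨?_, by omega, by omega⟩
  ring_nf
  omega

theorem div_step_part (run k : Int) (hk : 0 < k) (hfin : run % k + 1 < k) (h0 : 0 ≤ run % k) :
    (run + 1) / k = run / k ∧ (run + 1) % k = run % k + 1 := by
  have h3 := Int.mul_ediv_add_emod run k
  refine Int.ediv_emod_unique hk |>.mpr ⟨?_, by omega, by omega⟩
  ring_nf
  omega

-- reference run-length scan used only to link the two ports
def runScan (day k : Int) : List Int → Int → Int → Int
  | [], total, run => total + PySem.Int.floordiv run k
  | d :: rest, total, run =>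
    if d ≤ day then runScan day k rest total (run + 1)
    else runScan day k rest (total + PySem.Int.floordiv run k) 0

theorem runScan_add (day k : Int) (l : List Int) :
    ∀ (t r : Int), runScan day k l t r = t + runScan day k l 0 r := by
  induction l with
  | nil => intro t r; simp [runScan]
  | cons d rest ih =>
    intro t r
    by_cases hd : d ≤ day <;> simp only [runScan, hd, ite_true, ite_false]
    · rw [ih t (r + 1), ih 0 (r + 1)]
    · rw [ih (t + PySem.Int.floordiv r k), ih (0 + PySem.Int.floordiv r k)]
      ring

-- run-length scan equals reset-counter count, linked by cnt = run % k
theorem runScan_eq (day k : Int) (hk : 0 < k) (l : List Int) :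
    ∀ (total run : Int), 0 ≤ run →
      runScan day k l total run = total + run / k + fullCount day k l (run % k) := by
  induction l with
  | nil =>
    intro total run hr
    simp [runScan, fullCount, PySem.Int.floordiv_eq_ediv_of_pos hk]
  | cons d rest ih =>
    intro total run hr
    have hmod := Int.emod_nonneg run (by omega : k ≠ 0)
    have hmlt := Int.emod_lt_of_pos run hk
    by_cases hd : d ≤ day
    · simp only [runScan, fullCount, hd, ite_true]
      by_cases hfull : run % k + 1 = k
      · obtain ⟨hq, hr0⟩ := div_step_full run k hk hfull
        rw [ih total (run + 1) (by omega), hq, hr0, if_pos hfull]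
        ring
      · obtain ⟨hq, hr1⟩ := div_step_part run k hk (by omega) hmod
        rw [ih total (run + 1) (by omega), hq, hr1, if_neg hfull]
    · simp only [runScan, fullCount, hd, ite_false,
        if_neg (by omega : ¬ (0 : Int) = k)]
      rw [ih (total + PySem.Int.floordiv run k) 0 le_rfl,
        PySem.Int.floordiv_eq_ediv_of_pos hk]
      norm_num

-- the gap sum over the bounds list, consumed pairwise
def sumGaps (k : Int) : Int → List Int → Int
  | _, [] => 0
  | a, b :: rest => PySem.Int.floordiv (b - a - 1) k + sumGaps k b rest

theorem foldl_zip_gaps (k : Int) (bs : List Int) :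
    ∀ (a t : Int),
      (((a :: bs).zip bs).map
        (fun p => PySem.Int.floordiv (p.2 - p.1 - 1) k)).foldl (· + ·) t
      = t + sumGaps k a bs := by
  induction bs with
  | nil => intro a t; simp [sumGaps]
  | cons b rest ih =>
    intro a t
    simp only [List.zip_cons_cons, List.map_cons, List.foldl_cons, sumGaps]
    rw [ih b (t + PySem.Int.floordiv (b - a - 1) k)]
    ring

-- the blocker/sentinel gap sum equals the run-length scan, run length = s - prev - 1
theorem sumGaps_blockers (day k : Int) (l : List Int) :
    ∀ (s prev : Int),
      sumGaps k prev
        ((((PySem.List.enumerate l s).filter (fun p => day < p.2)).map (fun p => p.1))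
          ++ [s + (l.length : Int)])
      = runScan day k l 0 (s - prev - 1) := by
  induction l with
  | nil =>
    intro s prev
    simp [PySem.List.enumerate_nil, sumGaps, runScan]
  | cons d rest ih =>
    intro s prev
    have hlen : s + ((d :: rest).length : Int) = (s + 1) + (rest.length : Int) := by
      push_cast [List.length_cons]; ring
    rw [hlen]
    by_cases hd : d ≤ day
    · have hf : ¬ day < d := by omega
      rw [PySem.List.enumerate_cons]
      simp only [List.filter_cons, decide_eq_true_eq, hf, if_false]
      rw [ih (s + 1) prev]
      simp only [runScan, hd, ite_true]
      congr 1
      omega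
    · have ht : day < d := by omega
      rw [PySem.List.enumerate_cons]
      have : (decide (day < (d : Int))) = true := by simp [ht]
      simp only [List.filter_cons, this, if_true, List.map_cons, List.cons_append, sumGaps]
      rw [ih (s + 1) s]
      simp only [runScan, hd, ite_false]
      rw [runScan_add day k rest (0 + PySem.Int.floordiv (s - prev - 1) k)]
      have hz : (s + 1) - s - 1 = (0 : Int) := by omega
      rw [hz]
      ring

-- ===== VERDICT (by name: the statement is the Claim_ definition above) =====
theorem check_spec : Claim_equal_check := by
  intro bloomDay day m k _ hk
  unfold Spec_check check check_alt
  have hkpos : (0 : Int) < k := by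
    have : (1 : Int) ≤ k := hk
    omega
  simp only [List.tail_cons, decide_eq_decide]
  rw [foldl_zip_gaps k (((PySem.List.enumerate bloomDay 0).filter (fun p => day < p.2)).map (fun p => p.1) ++ [(bloomDay.length : Int)]) (-1) 0]
  have hs := sumGaps_blockers day k bloomDay 0 (-1)
  norm_num at hs
  rw [hs, runScan_eq day k hkpos bloomDay 0 0 le_rfl]
  rw [checkLoop_ge_iff day m k bloomDay 0 0]
  have hz : (0 : Int) / k = 0 := Int.zero_ediv k
  have hz2 : (0 : Int) % k = 0 := Int.zero_emod k
  rw [hz, hz2]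
  omega
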